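-- pv_equiv track=rewrite | github.com/MrBrantCode/unitest_baseline | mut_generate/mist_train_cf/cf_64440/solution.py | check_word_anagram
-- ===== SOURCE A (Python) =====
-- def check_word_anagram(word, doc):
--     word_freq_dict = {}
--     for c in word.lower():
--         if c.isalpha():
--             if c in word_freq_dict:
--                 word_freq_dict[c] += 1
--             else:
--                 word_freq_dict[c] = 1
--
--     doc_freq_dict = {}
--     for c in doc.lower():
--         if c.isalpha():
--             if c in doc_freq_dict:
--                 doc_freq_dict[c] += 1
--             else:
--                 doc_freq_dict[c] = 1
--
--     for key in word_freq_dict: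
--         if key not in doc_freq_dict or word_freq_dict[key] > doc_freq_dict[key]:
--             return False
--     return True
-- ===== SOURCE B (Python) =====
-- def check_word_anagram(word, doc):
--     budget = {}
--     for c in doc.lower():
--         if c.isalpha():
--             budget[c] = budget.get(c, 0) + 1
--     for c in word.lower():
--         if c.isalpha():
--             if budget.get(c, 0) <= 0:
--                 return False
--             budget[c] -= 1
--     return True
-- ===== Notes on version B (the rewrite author's own statement) =====
-- stated objective: simpler
-- what changed: Instead of building two frequency dicts and comparing them key by key afterwards, B builds one budget dict for doc and consumes it in a single early-exit pass over word's alphabetic characters.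
import Mathlib
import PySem

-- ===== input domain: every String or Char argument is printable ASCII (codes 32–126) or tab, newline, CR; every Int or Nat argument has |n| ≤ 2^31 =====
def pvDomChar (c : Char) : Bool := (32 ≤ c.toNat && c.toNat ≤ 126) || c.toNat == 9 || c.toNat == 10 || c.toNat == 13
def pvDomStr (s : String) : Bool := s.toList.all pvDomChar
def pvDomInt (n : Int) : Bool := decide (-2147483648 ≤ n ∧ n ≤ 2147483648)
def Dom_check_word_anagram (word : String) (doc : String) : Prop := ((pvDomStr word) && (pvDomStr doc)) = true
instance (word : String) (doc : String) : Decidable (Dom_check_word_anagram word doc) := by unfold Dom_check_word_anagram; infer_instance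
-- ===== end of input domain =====

-- B builds one budget dict for doc and consumes it in a single early-exit pass over word,
-- instead of A's two frequency dicts compared key by key afterwards (objective: simpler).

-- ===== PORT A =====
-- A-side helper: A's counting loop (run once for word, once for doc)
def pvTally (cs : List Char) : PySem.Dict Char Int :=
  cs.foldl
    (fun d c =>
      if PySem.Chars.isalpha c then
        (if d.contains c then d.insert c (d.getD c 0 + 1) else d.insert c 1)
      else d)
    PySem.Dict.empty

def check_word_anagram (word : String) (doc : String) : Bool :=
  let word_freq_dict := pvTally (PySem.Str.lower word).toList
  let doc_freq_dict := pvTally (PySem.Str.lower doc).toList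
  word_freq_dict.keys.all (fun key =>
    !((!doc_freq_dict.contains key) ||
      decide (word_freq_dict.getD key 0 > doc_freq_dict.getD key 0)))

-- ===== PORT B =====
-- B-side helper: the early-exit consuming loop over word's characters
def pvConsume (budget : PySem.Dict Char Int) (cs : List Char) : Bool :=
  match cs with
  | [] => true
  | c :: rest =>
    if PySem.Chars.isalpha c then
      if budget.getD c 0 ≤ 0 then false
      else pvConsume (budget.insert c (budget.getD c 0 - 1)) rest
    else pvConsume budget rest

def check_word_anagram_alt (word : String) (doc : String) : Bool :=
  let budget :=
    (PySem.Str.lower doc).toList.foldl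
      (fun d c => if PySem.Chars.isalpha c then d.insert c (d.getD c 0 + 1) else d)
      PySem.Dict.empty
  pvConsume budget (PySem.Str.lower word).toList

-- ===== PRECONDITION & SPEC =====
def Spec_check_word_anagram (word : String) (doc : String) (out : Bool) : Prop := out = check_word_anagram_alt word doc
instance (word : String) (doc : String) (out : Bool) : Decidable (Spec_check_word_anagram word doc out) := by unfold Spec_check_word_anagram; infer_instance

-- ===== CLAIM (what is proved, stated in full; the proofs are below) =====
def Claim_equal_check_word_anagram : Prop := ∀ (word : String) (doc : String), Dom_check_word_anagram word doc → Spec_check_word_anagram word doc (check_word_anagram word doc)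

-- ===== LEMMAS AND PROOFS =====

-- A's counting loop (with its contains-branch) builds exactly the counter of the alpha chars.
theorem pv_tally_eq (cs : List Char) :
    pvTally cs = PySem.Dict.counter (cs.filter PySem.Chars.isalpha) := by
  unfold pvTally
  rw [← PySem.Dict.foldl_insert_getD_add_one_eq_counter, List.foldl_filter]
  congr 1
  funext d c
  by_cases h : PySem.Chars.isalpha c
  · by_cases hc : d.contains c
    · simp [h, hc]
    · simp [h, hc, PySem.Dict.getD_of_not_contains d 0 (by simpa using hc)]
  · simp [h]

-- B's budget loop builds the same counter.
theorem pv_budget_eq (cs : List Char) :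
    cs.foldl
      (fun d c => if PySem.Chars.isalpha c then d.insert c (d.getD c 0 + 1) else d)
      PySem.Dict.empty
    = PySem.Dict.counter (cs.filter PySem.Chars.isalpha) := by
  rw [← PySem.Dict.foldl_insert_getD_add_one_eq_counter, List.foldl_filter]

-- The consuming loop succeeds iff every alpha char's multiplicity fits the budget.
theorem pvConsume_spec (cs : List Char) : ∀ d : PySem.Dict Char Int,
    pvConsume d cs = true ↔
      ∀ k ∈ cs.filter PySem.Chars.isalpha,
        ((cs.filter PySem.Chars.isalpha).count k : Int) ≤ d.getD k 0 := by
  induction cs with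
  | nil => intro d; simp [pvConsume]
  | cons c rest ih =>
    intro d
    by_cases ha : PySem.Chars.isalpha c
    · have hf : (c :: rest).filter PySem.Chars.isalpha
          = c :: rest.filter PySem.Chars.isalpha := by simp [ha]
      by_cases hz : d.getD c 0 ≤ 0
      · simp only [pvConsume, ha, if_true, hz, hf]
        constructor
        · intro h; exact absurd h (by simp)
        · intro h
          have := h c (List.mem_cons_self)
          have hcnt : (1 : Int) ≤ ((c :: rest.filter PySem.Chars.isalpha).count c : Int) := by
            have : 0 < (c :: rest.filter PySem.Chars.isalpha).count c := by
              simp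
            exact_mod_cast this
          omega
      · simp only [pvConsume, ha, if_true, hz, if_false, hf]
        rw [ih]
        constructor
        · intro h k hk
          by_cases hkc : k = c
          · subst hkc
            have hcount : (k :: rest.filter PySem.Chars.isalpha).count k
                = (rest.filter PySem.Chars.isalpha).count k + 1 := by
              simp
            by_cases hm : k ∈ rest.filter PySem.Chars.isalpha
            · have := h k hm
              rw [PySem.Dict.getD_insert_self] at this
              push_cast [hcount]
              omega
            · have : (rest.filter PySem.Chars.isalpha).count k = 0 :=
                List.count_eq_zero.mpr hm
              push_cast [hcount, this]
              omega
          · have hk' : k ∈ rest.filter PySem.Chars.isalpha := by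
              rcases List.mem_cons.mp hk with h1 | h1
              · exact absurd h1 hkc
              · exact h1
            have := h k hk'
            rw [PySem.Dict.getD_insert, if_neg hkc] at this
            have hcount : (c :: rest.filter PySem.Chars.isalpha).count k
                = (rest.filter PySem.Chars.isalpha).count k := by
              simp [List.count_cons]
              exact fun h => hkc h.symm
            rw [hcount]
            exact this
        · intro h k hk
          by_cases hkc : k = c
          · subst hkc
            have := h k (List.mem_cons_self)
            have hcount : (k :: rest.filter PySem.Chars.isalpha).count k
                = (rest.filter PySem.Chars.isalpha).count k + 1 := by
              simp
            rw [hcount] at this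
            rw [PySem.Dict.getD_insert_self]
            push_cast at this
            omega
          · have := h k (List.mem_cons_of_mem _ hk)
            have hcount : (c :: rest.filter PySem.Chars.isalpha).count k
                = (rest.filter PySem.Chars.isalpha).count k := by
              simp [List.count_cons]
              exact fun h => hkc h.symm
            rw [hcount] at this
            rw [PySem.Dict.getD_insert, if_neg hkc]
            exact this
    · have hf : (c :: rest).filter PySem.Chars.isalpha
          = rest.filter PySem.Chars.isalpha := by simp [ha]
      simp only [pvConsume, ha, hf]
      exact ih d

-- ===== VERDICT (by name: the statement is the Claim_ definition above) =====
theorem check_word_anagram_spec : Claim_equal_check_word_anagram := by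
  intro word doc _
  unfold Spec_check_word_anagram check_word_anagram check_word_anagram_alt
  rw [Bool.eq_iff_iff]
  simp only [PySem.Str.toList_lower, pv_tally_eq, pv_budget_eq, pvConsume_spec]
  set wl := (PySem.Chars.lower word.toList).filter PySem.Chars.isalpha with hwl
  set dl := (PySem.Chars.lower doc.toList).filter PySem.Chars.isalpha with hdl
  simp only [List.all_eq_true, PySem.Dict.keys_counter, PySem.Dict.contains_counter,
    PySem.Dict.getD_counter]
  constructor
  · intro h k hk
    have hk' : k ∈ PySem.Set.ofList wl := (PySem.Set.mem_ofList wl k).mpr hk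
    have := h k hk'
    simp only [Bool.not_eq_true', Bool.or_eq_false_iff,
      decide_eq_false_iff_not, not_lt] at this
    exact this.2
  · intro h k hk
    have hk' : k ∈ wl := (PySem.Set.mem_ofList wl k).mp hk
    have hle := h k hk'
    have hpos : 0 < wl.count k := List.count_pos_iff.mpr hk'
    have hdm : k ∈ dl := by
      apply List.count_pos_iff.mp
      have : (0 : Int) < (dl.count k : Int) := by
        have : (0 : Int) < (wl.count k : Int) := by exact_mod_cast hpos
        omega
      exact_mod_cast this
    simp only [Bool.not_eq_true', Bool.or_eq_false_iff,
      decide_eq_false_iff_not, not_lt]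
    exact ⟨by simp [hdm], hle⟩
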